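-- pv_equiv track=rewrite | github.com/jerrylee17/Algorithms | GoogleCompetitions/CodeJam/2021/QualRound/moonUnbrella.py | solve
-- ===== SOURCE A (Python) =====
-- def solve(cj, jc, s):
--     s = s.replace('?', '')
--     if not s:
--         return 0
--     cost = 0
--     prev = s[0]
--     for c in s[1:]:
--         if c != prev:
--             if prev == 'C':
--                 cost += cj
--             else:
--                 cost += jc
--         prev = c
--     return cost
-- ===== SOURCE B (Python) =====
-- def solve(cj, jc, s):
--     t = s.replace('?', '')
--
--     def go(lo, hi):
--         # transition cost inside t[lo:hi], by divide and conquer: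
--         # split at the midpoint, charge the one boundary pair that straddles it
--         if hi - lo < 2:
--             return 0
--         mid = (lo + hi) // 2
--         if t[mid - 1] != t[mid]:
--             edge = cj if t[mid - 1] == 'C' else jc
--         else:
--             edge = 0
--         return go(lo, mid) + edge + go(mid, hi)
--
--     return go(0, len(t))
-- ===== Notes on version B (the rewrite author's own statement) =====
-- stated objective: alternative
-- what changed: Replaces the stateful left-to-right walk with a prev variable by a divide-and-conquer recursion: after stripping '?', the cost of t[lo:hi] is the cost of the two halves plus the charge of the single pair straddling the midpoint.
import Mathlib
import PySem

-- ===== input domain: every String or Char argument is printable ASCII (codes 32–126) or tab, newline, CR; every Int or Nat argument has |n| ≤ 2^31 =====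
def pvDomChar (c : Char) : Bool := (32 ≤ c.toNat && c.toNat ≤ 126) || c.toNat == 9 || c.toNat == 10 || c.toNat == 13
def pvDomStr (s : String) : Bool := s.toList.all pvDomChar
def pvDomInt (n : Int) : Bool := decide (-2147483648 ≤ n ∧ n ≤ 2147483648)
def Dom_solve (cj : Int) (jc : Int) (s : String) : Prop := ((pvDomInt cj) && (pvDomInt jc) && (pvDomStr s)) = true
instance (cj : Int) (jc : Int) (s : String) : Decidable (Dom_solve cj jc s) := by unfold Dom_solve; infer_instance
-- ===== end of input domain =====

-- B replaces A's stateful left-to-right prev-tracking walk by a divide-and-conquer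
-- recursion on index ranges (halves plus the one straddling boundary pair); objective: alternative.

-- ===== PORT A =====
-- literal port of A: strip '?' with str.replace, return 0 on empty, else walk s[1:]
-- carrying (prev, cost) exactly as the Python loop does
def solve (cj : Int) (jc : Int) (s : String) : Int :=
  match (PySem.Str.replace s "?" "").toList with
  | [] => 0
  | p :: rest =>
      (rest.foldl
        (fun st c =>
          (c, if c ≠ st.1 then (if st.1 = 'C' then st.2 + cj else st.2 + jc) else st.2))
        (p, (0 : Int))).2

-- ===== PORT B =====
-- literal port of Source B's inner go(lo, hi): Python's t[i] is ported as t.getD i ' ';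
-- exact because go only ever indexes with mid-1, mid in [lo, hi) ⊆ [0, len t)
def goB (cj : Int) (jc : Int) (t : List Char) (lo hi : Nat) : Int :=
  if hi - lo < 2 then 0
  else
    let mid := (lo + hi) / 2
    let edge := if t.getD (mid - 1) ' ' ≠ t.getD mid ' '
      then (if t.getD (mid - 1) ' ' = 'C' then cj else jc) else 0
    goB cj jc t lo mid + edge + goB cj jc t mid hi
termination_by hi - lo
decreasing_by all_goals omega

-- literal port of Source B: t = s.replace('?',''); return go(0, len(t))
def solve_alt (cj : Int) (jc : Int) (s : String) : Int :=
  let t := (PySem.Str.replace s "?" "").toList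
  goB cj jc t 0 t.length

-- ===== PRECONDITION & SPEC =====
def Spec_solve (cj : Int) (jc : Int) (s : String) (out : Int) : Prop := out = solve_alt cj jc s
instance (cj : Int) (jc : Int) (s : String) (out : Int) : Decidable (Spec_solve cj jc s out) := by unfold Spec_solve; infer_instance

-- ===== CLAIM (what is proved, stated in full; the proofs are below) =====
def Claim_equal_solve : Prop := ∀ (cj : Int) (jc : Int) (s : String), Dom_solve cj jc s → Spec_solve cj jc s (solve cj jc s)

-- ===== LEMMAS AND PROOFS =====

-- replace(s, '?', '') removes exactly the '?' characters
lemma replace_go_q (fuel : Nat) (l acc : List Char) (h : l.length ≤ fuel) :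
    PySem.Chars.replace.go ['?'] [] fuel l acc
      = acc.reverse ++ l.filter (fun c => c != '?') := by
  induction fuel generalizing l acc with
  | zero =>
      cases l with
      | nil => simp [PySem.Chars.replace.go]
      | cons c t => simp at h
  | succ n ih =>
      cases l with
      | nil => simp [PySem.Chars.replace.go]
      | cons c t =>
          simp only [List.length_cons] at h
          by_cases hc : c = '?'
          · subst hc
            have : (['?'] : List Char).isPrefixOf ('?' :: t) = true := by
              simp [List.isPrefixOf]
            simp [PySem.Chars.replace.go, this, ih t acc (by omega), List.filter]
          · have hpre : (['?'] : List Char).isPrefixOf (c :: t) = false := by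
              simp only [List.isPrefixOf, Bool.and_true,
                beq_eq_false_iff_ne, ne_eq]
              exact fun h => hc h.symm
            have hb : (c != '?') = true := by simp [hc]
            simp [PySem.Chars.replace.go, hpre, ih t (c :: acc) (by omega),
                  List.filter, hb]

lemma replace_q (cs : List Char) :
    PySem.Chars.replace cs ['?'] [] = cs.filter (fun c => c != '?') := by
  unfold PySem.Chars.replace
  simp [replace_go_q cs.length cs [] le_rfl]

-- the transition cost of a character list, structurally (the common reference value)
def pvW (cj jc : Int) : List Char → Int
  | [] => 0
  | [_] => 0
  | a :: b :: r =>
      (if a = b then 0 else if a = 'C' then cj else jc) + pvW cj jc (b :: r)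

lemma pvW_short (cj jc : Int) (l : List Char) (h : l.length ≤ 1) :
    pvW cj jc l = 0 := by
  match l with
  | [] => rfl
  | [_] => rfl
  | _ :: _ :: _ => simp at h

-- A's fold accumulates exactly pvW
lemma foldl_W (cj jc : Int) (rest : List Char) :
    ∀ (p : Char) (cost : Int),
    (rest.foldl
        (fun st c =>
          (c, if c ≠ st.1 then (if st.1 = 'C' then st.2 + cj else st.2 + jc) else st.2))
        (p, cost)).2
      = cost + pvW cj jc (p :: rest) := by
  induction rest with
  | nil => intro p cost; simp [pvW]
  | cons c rs ih =>
      intro p cost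
      simp only [List.foldl_cons, ih, pvW]
      by_cases h : p = c
      · simp [h]
      · have h' : ¬ c = p := fun hh => h hh.symm
        by_cases hC : p = 'C'
        · have hcC : ¬ c = 'C' := by rw [hC] at h'; exact h'
          have hCc : ¬ 'C' = c := fun hh => hcC hh.symm
          simp only [hC, hcC, hCc, if_false, ite_true, ne_eq, not_false_iff]
          ring
        · simp only [h, h', hC, if_false, ite_true, ne_eq, not_false_iff]
          ring

-- pvW splits across a concatenation, charging the straddling pair
lemma pvW_append (cj jc : Int) :
    ∀ (u : List Char) (b : Char) (v : List Char), u ≠ [] →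
    pvW cj jc (u ++ b :: v)
      = pvW cj jc u
        + (if u.getLastD ' ' = b then 0 else if u.getLastD ' ' = 'C' then cj else jc)
        + pvW cj jc (b :: v) := by
  intro u
  induction u with
  | nil => intro b v h; exact absurd rfl h
  | cons a u' ih =>
      intro b v _
      cases u' with
      | nil => simp [pvW]
      | cons c u'' =>
          have hrec := ih b v (by simp)
          simp only [List.cons_append, List.getLastD_cons] at hrec
          simp only [List.cons_append, pvW, List.getLastD_cons]
          rw [hrec]
          ring

-- goB computes pvW of the corresponding sublist
lemma goB_W (cj jc : Int) (t : List Char) :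
    ∀ (n lo hi : Nat), hi - lo ≤ n → hi ≤ t.length →
    goB cj jc t lo hi = pvW cj jc ((t.drop lo).take (hi - lo)) := by
  intro n
  induction n with
  | zero =>
      intro lo hi h _
      rw [goB]
      have : hi - lo = 0 := by omega
      simp [this, pvW]
  | succ n ih =>
      intro lo hi h hlen
      rw [goB]
      by_cases h2 : hi - lo < 2
      · have : ((t.drop lo).take (hi - lo)).length ≤ 1 := by
          simp only [List.length_take, List.length_drop]
          omega
        simp [h2, pvW_short cj jc _ this]
      · simp only [h2, if_false]
        have hmid1 : lo < (lo + hi) / 2 := by omega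
        have hmid2 : (lo + hi) / 2 < hi := by omega
        set mid := (lo + hi) / 2 with hmid
        have hmlen : mid < t.length := by omega
        -- split the sublist at mid
        have hsplit : (t.drop lo).take (hi - lo)
            = (t.drop lo).take (mid - lo) ++ (t.drop mid).take (hi - mid) := by
          have harith : hi - lo = (mid - lo) + (hi - mid) := by omega
          have harith2 : lo + (mid - lo) = mid := by omega
          rw [harith, List.take_add, List.drop_drop, harith2]
        have hvcons : (t.drop mid).take (hi - mid)
            = t.getD mid ' ' :: (t.drop (mid + 1)).take (hi - mid - 1) := by
          rw [List.drop_eq_getElem_cons hmlen]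
          have : hi - mid = (hi - mid - 1) + 1 := by omega
          rw [this, List.take_succ_cons]
          congr 1
          rw [List.getD_eq_getElem?_getD, List.getElem?_eq_getElem hmlen]
          rfl
        have hulen : ((t.drop lo).take (mid - lo)).length = mid - lo := by
          simp only [List.length_take, List.length_drop]
          omega
        have hune : (t.drop lo).take (mid - lo) ≠ [] := by
          intro hc
          rw [hc] at hulen
          simp at hulen
          omega
        have hulast : ((t.drop lo).take (mid - lo)).getLastD ' ' = t.getD (mid - 1) ' ' := by
          rw [List.getLastD_eq_getLast?, List.getLast?_eq_getElem?, hulen]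
          rw [List.getElem?_take_of_lt (by omega), List.getElem?_drop]
          have harith3 : lo + (mid - lo - 1) = mid - 1 := by omega
          rw [harith3, List.getD_eq_getElem?_getD]
        rw [hsplit, hvcons, pvW_append cj jc _ _ _ hune, hulast, ← hvcons]
        rw [ih lo mid (by omega) (by omega), ih mid hi (by omega) hlen]
        simp

-- ===== VERDICT (by name: the statement is the Claim_ definition above) =====
theorem solve_spec : Claim_equal_solve := by
  intro cj jc s _
  unfold Spec_solve solve solve_alt
  have hrep : (PySem.Str.replace s "?" "").toList
      = s.toList.filter (fun c => c != '?') := by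
    have := replace_q s.toList
    simpa [PySem.Str.toList_replace] using this
  simp only [hrep]
  have hgo := goB_W cj jc (s.toList.filter (fun c => c != '?'))
      (s.toList.filter (fun c => c != '?')).length 0
      (s.toList.filter (fun c => c != '?')).length le_rfl le_rfl
  cases h : s.toList.filter (fun c => c != '?') with
  | nil =>
      rw [h] at hgo
      simpa using hgo.symm
  | cons p rest =>
      rw [h] at hgo
      simp only [foldl_W cj jc rest p 0, hgo]
      simp
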